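-- pv_equiv track=rewrite | github.com/Hyoukjoo/study-algo | programmers/모의고사.py | solution
-- ===== SOURCE A (Python) =====
-- def solution(answers):
--     n = len(answers)
--     a = [1,2,3,4,5]
--     b = [2,1,2,3,2,4,2,5]
--     c = [3, 3, 1, 1, 2, 2, 4, 4, 5, 5]
--     score = [0,0,0]
--     result = []
--
--     for i, v in enumerate(answers):
--         if v == a[i % len(a)]:
--             score[0] += 1
--         if v == b[i % len(b)]:
--             score[1] += 1
--         if v == c[i % len(c)]:
--             score[2] += 1
--
--
--     for i, v in enumerate(score):
--         if v == max(score):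
--             result.append(i+1)
--
--     return result
-- ===== SOURCE B (Python) =====
-- def solution(answers):
--     a = [1, 2, 3, 4, 5]
--     b = [2, 1, 2, 3, 2, 4, 2, 5]
--     c = [3, 3, 1, 1, 2, 2, 4, 4, 5, 5]
--     # All three patterns repeat with period 40 = lcm(5, 8, 10): index the
--     # answers once by (position mod 40, value) into a frequency table, then
--     # score each pattern by 40 table lookups instead of scanning the answers.
--     cnt = {}
--     for i, v in enumerate(answers):
--         key = (i % 40, v)
--         cnt[key] = cnt.get(key, 0) + 1
--     scores = [sum(cnt.get((i, p[i % len(p)]), 0) for i in range(40))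
--               for p in (a, b, c)]
--     m = max(scores)
--     return [i + 1 for i, s in enumerate(scores) if s == m]
-- ===== Notes on version B (the rewrite author's own statement) =====
-- stated objective: alternative
-- what changed: B builds a frequency table keyed by (position mod 40, value) in one pass (40 = lcm of the three pattern lengths) and scores each pattern by 40 table lookups, instead of A's single interleaved loop comparing every answer against all three cyclic patterns; the max is taken once instead of recomputed per result-loop iteration.
import Mathlib
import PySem

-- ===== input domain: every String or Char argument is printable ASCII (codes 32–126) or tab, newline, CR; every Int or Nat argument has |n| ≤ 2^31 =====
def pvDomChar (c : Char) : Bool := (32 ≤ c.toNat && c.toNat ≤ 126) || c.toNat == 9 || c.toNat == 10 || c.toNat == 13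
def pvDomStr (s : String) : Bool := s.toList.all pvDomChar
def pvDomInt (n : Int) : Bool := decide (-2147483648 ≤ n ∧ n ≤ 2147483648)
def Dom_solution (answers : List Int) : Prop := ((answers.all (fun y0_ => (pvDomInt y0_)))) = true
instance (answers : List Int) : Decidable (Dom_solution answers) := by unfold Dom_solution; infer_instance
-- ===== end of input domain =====

-- B indexes the answers once by (position mod 40, value) — 40 = lcm of the pattern lengths —
-- and scores each pattern by 40 table lookups instead of scanning the answers per pattern;
-- objective: alternative (a frequency table replaces the interleaved compare loop).


-- ===== PORT A =====
-- literal port of A: one enumerate loop updating the three scores together,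
-- then a loop over the score list recomputing max(score) in its test each iteration
def solution (answers : List Int) : List Int :=
  let a : List Int := [1, 2, 3, 4, 5]
  let b : List Int := [2, 1, 2, 3, 2, 4, 2, 5]
  let c : List Int := [3, 3, 1, 1, 2, 2, 4, 4, 5, 5]
  let score : Int × Int × Int :=
    (PySem.List.enumerate answers 0).foldl
      (fun s iv =>
        let s0 := if iv.2 = PySem.List.pyGetD a (PySem.Int.mod iv.1 (a.length : Int)) 0 then s.1 + 1 else s.1
        let s1 := if iv.2 = PySem.List.pyGetD b (PySem.Int.mod iv.1 (b.length : Int)) 0 then s.2.1 + 1 else s.2.1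
        let s2 := if iv.2 = PySem.List.pyGetD c (PySem.Int.mod iv.1 (c.length : Int)) 0 then s.2.2 + 1 else s.2.2
        (s0, s1, s2))
      (0, 0, 0)
  let scoreL : List Int := [score.1, score.2.1, score.2.2]
  (PySem.List.enumerate scoreL 0).foldl
    (fun r iv => if some iv.2 = PySem.List.max? scoreL id then r ++ [iv.1 + 1] else r) []

-- ===== PORT B =====
-- Source B's frequency table: cnt[(i % 40, v)] = cnt.get((i % 40, v), 0) + 1 over enumerate(answers)
def buildCnt (answers : List Int) : PySem.Dict (Int × Int) Int :=
  (PySem.List.enumerate answers 0).foldl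
    (fun d iv =>
      d.insert (PySem.Int.mod iv.1 40, iv.2) (d.getD (PySem.Int.mod iv.1 40, iv.2) 0 + 1))
    PySem.Dict.empty

-- Source B's per-pattern score: sum(cnt.get((i, p[i % len(p)]), 0) for i in range(40))
def patScore (cnt : PySem.Dict (Int × Int) Int) (p : List Int) : Int :=
  (PySem.List.pyRange 0 40 1).foldl
    (fun s i => s + cnt.getD (i, PySem.List.pyGetD p (PySem.Int.mod i (p.length : Int)) 0) 0) 0

def solution_alt (answers : List Int) : List Int :=
  let a : List Int := [1, 2, 3, 4, 5]
  let b : List Int := [2, 1, 2, 3, 2, 4, 2, 5]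
  let c : List Int := [3, 3, 1, 1, 2, 2, 4, 4, 5, 5]
  let cnt := buildCnt answers
  let scores : List Int := [a, b, c].map (patScore cnt)
  let m : Int := (PySem.List.max? scores id).getD 0   -- scores is nonempty, so max? is some
  (PySem.List.enumerate scores 0).foldl
    (fun r iv => if iv.2 = m then r ++ [iv.1 + 1] else r) []

-- ===== PRECONDITION & SPEC =====
def Spec_solution (answers : List Int) (out : List Int) : Prop := out = solution_alt answers
instance (answers : List Int) (out : List Int) : Decidable (Spec_solution answers out) := by unfold Spec_solution; infer_instance

-- ===== CLAIM (what is proved, stated in full; the proofs are below) =====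
def Claim_equal_solution : Prop := ∀ (answers : List Int), Dom_solution answers → Spec_solution answers (solution answers)

-- ===== LEMMAS AND PROOFS =====

-- A's interleaved counting fold over a triple is the triple of three independent counting folds
theorem foldl_split3 {α : Type} (c0 c1 c2 : α → Prop)
    [DecidablePred c0] [DecidablePred c1] [DecidablePred c2]
    (l : List α) (s0 s1 s2 : Int) :
    l.foldl (fun s x =>
        (if c0 x then s.1 + 1 else s.1,
         if c1 x then s.2.1 + 1 else s.2.1,
         if c2 x then s.2.2 + 1 else s.2.2)) (s0, s1, s2)
      = (l.foldl (fun a x => if c0 x then a + 1 else a) s0,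
         l.foldl (fun a x => if c1 x then a + 1 else a) s1,
         l.foldl (fun a x => if c2 x then a + 1 else a) s2) := by
  induction l generalizing s0 s1 s2 with
  | nil => rfl
  | cons x t ih => simp only [List.foldl]; rw [ih]

-- a lookup in the built table is the multiplicity of the (residue, value) key
theorem getD_build_aux (l : List (Int × Int)) :
    ∀ (d : PySem.Dict (Int × Int) Int) (v : Int × Int),
    (l.foldl (fun d iv =>
        d.insert (PySem.Int.mod iv.1 40, iv.2) (d.getD (PySem.Int.mod iv.1 40, iv.2) 0 + 1)) d).getD v 0
      = d.getD v 0
        + (((l.map (fun iv => ((PySem.Int.mod iv.1 40, iv.2) : Int × Int))).count v : Nat) : Int) := by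
  induction l with
  | nil => intro d v; simp
  | cons x t ih =>
    intro d v
    rw [List.foldl_cons, ih, PySem.Dict.getD_insert, List.map_cons, List.count_cons]
    by_cases hv : v = (PySem.Int.mod x.1 40, x.2)
    · rw [if_pos hv, if_pos (beq_iff_eq.mpr hv.symm), hv]
      push_cast; ring
    · rw [if_neg hv, if_neg (fun hb => hv (beq_iff_eq.mp hb).symm)]
      push_cast; ring

theorem getD_buildCnt (answers : List Int) (v : Int × Int) :
    (buildCnt answers).getD v 0
      = ((((PySem.List.enumerate answers 0).map
            (fun iv => ((PySem.Int.mod iv.1 40, iv.2) : Int × Int))).count v : Nat) : Int) := by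
  unfold buildCnt
  rw [getD_build_aux, PySem.Dict.getD_empty, zero_add]

-- the indicator sum over range(40): only i = r can match the first component of the key
theorem sum_indicator (f : Int → Int) (r x : Int) (hr0 : 0 ≤ r) (hr : r < 40) :
    ((PySem.List.pyRange 0 40 1).map
        (fun i => if ((r, x) : Int × Int) = (i, f i) then (1 : Int) else 0)).sum
      = if x = f r then (1 : Int) else 0 := by
  rw [List.sum_map_eq_nsmul_single r
        (fun i => if ((r, x) : Int × Int) = (i, f i) then (1 : Int) else 0)
        (fun i hi _ => if_neg (fun hc => hi (congrArg Prod.fst hc).symm))]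
  rw [List.count_eq_one_of_mem (PySem.List.nodup_pyRange_one 0 40)
        (PySem.List.mem_pyRange_one.mpr ⟨hr0, hr⟩), one_smul]
  by_cases h : x = f r
  · simp [h]
  · simp [h]

-- the heart of the proof: summing the (residue, value) frequency table of the answers
-- against any residue-indexed key function f counts the positions whose value matches f
theorem sum_count_key (f : Int → Int) (xs : List Int) :
    ∀ (s : Int), 0 ≤ s →
    ((PySem.List.pyRange 0 40 1).map
        (fun i => ((((PySem.List.enumerate xs s).map
            (fun iv => ((PySem.Int.mod iv.1 40, iv.2) : Int × Int))).count (i, f i) : Nat) : Int))).sum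
      = ((PySem.List.enumerate xs s).countP
          (fun iv => iv.2 = f (PySem.Int.mod iv.1 40)) : Int) := by
  induction xs with
  | nil => intro s _; simp [PySem.List.enumerate_nil]
  | cons x t ih =>
    intro s hs
    rw [PySem.List.enumerate_cons]
    simp only [List.map_cons, List.countP_cons]
    have hkey : ∀ i ∈ PySem.List.pyRange 0 40 1,
        ((((PySem.Int.mod s 40, x) :: (PySem.List.enumerate t (s + 1)).map
            (fun iv => ((PySem.Int.mod iv.1 40, iv.2) : Int × Int))).count (i, f i) : Nat) : Int)
        = ((((PySem.List.enumerate t (s + 1)).map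
            (fun iv => ((PySem.Int.mod iv.1 40, iv.2) : Int × Int))).count (i, f i) : Nat) : Int)
          + (if ((PySem.Int.mod s 40, x) : Int × Int) = (i, f i) then (1 : Int) else 0) := by
      intro i _
      rw [List.count_cons]
      push_cast
      congr 1
      by_cases hc : ((PySem.Int.mod s 40, x) : Int × Int) = (i, f i)
      · rw [if_pos (beq_iff_eq.mpr hc), if_pos hc]
      · rw [if_neg (fun hb => hc (beq_iff_eq.mp hb)), if_neg hc]
    rw [List.map_congr_left hkey, List.sum_map_add]
    have hmod : PySem.Int.mod s 40 = s % 40 := PySem.Int.mod_eq_emod_of_pos (by norm_num)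
    rw [sum_indicator f (PySem.Int.mod s 40) x
          (hmod ▸ Int.emod_nonneg s (by norm_num))
          (hmod ▸ Int.emod_lt_of_pos s (by norm_num))]
    rw [ih (s + 1) (by omega)]
    simp only [decide_eq_true_eq]
    by_cases hx : x = f (PySem.Int.mod s 40) <;> push_cast <;> simp [hx]

-- B's table-lookup score over range(40) equals the direct counting fold A performs,
-- for any pattern whose length divides 40
theorem patScore_eq (answers p : List Int) (hdvd : ((p.length : Int)) ∣ 40) :
    patScore (buildCnt answers) p
      = (PySem.List.enumerate answers 0).foldl
          (fun acc iv => if iv.2 = PySem.List.pyGetD p (PySem.Int.mod iv.1 (p.length : Int)) 0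
                         then acc + 1 else acc) 0 := by
  unfold patScore
  rw [PySem.List.foldl_add, zero_add]
  simp only [getD_buildCnt]
  rw [sum_count_key (fun i => PySem.List.pyGetD p (PySem.Int.mod i (p.length : Int)) 0) answers 0 le_rfl]
  rw [PySem.List.foldl_ite_add_one, zero_add]
  congr 1
  apply List.countP_congr
  intro iv hiv
  obtain ⟨k, hk, hiveq⟩ := (PySem.List.mem_enumerate_iff _ _ _).mp hiv
  subst hiveq
  simp only [zero_add, decide_eq_true_eq]
  have hL : (0 : Int) < (p.length : Int) := by
    rcases Nat.eq_zero_or_pos p.length with h0 | hpos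
    · exfalso; rw [h0] at hdvd; norm_num at hdvd
    · exact_mod_cast hpos
  simp only [PySem.Int.mod_eq_emod_of_pos hL,
      PySem.Int.mod_eq_emod_of_pos (show (0:Int) < 40 by norm_num),
      Int.emod_emod_of_dvd _ hdvd]

-- the selection over a 3-element score list: testing 'some v = max?' (A, max recomputed
-- each iteration) agrees with testing 'v = (max?).getD 0' (B, max taken once)
set_option maxRecDepth 4096 in
theorem select_eq (x y z : Int) :
    (PySem.List.enumerate [x, y, z] 0).foldl
        (fun r iv => if some iv.2 = PySem.List.max? [x, y, z] id then r ++ [iv.1 + 1] else r) []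
      = (PySem.List.enumerate [x, y, z] 0).foldl
        (fun r iv => if iv.2 = (PySem.List.max? [x, y, z] id).getD 0 then r ++ [iv.1 + 1] else r) [] := by
  simp only [PySem.List.max?, PySem.List.enumerate_cons, PySem.List.enumerate_nil, List.foldl]
  simp only [id_eq]
  by_cases h1 : x < y <;> by_cases h2 : y < z <;> by_cases h3 : x < z <;>
    simp [h1, h2, h3]

-- ===== VERDICT (by name: the statement is the Claim_ definition above) =====
theorem solution_spec : Claim_equal_solution := by
  intro answers _
  show solution answers = solution_alt answers
  unfold solution solution_alt
  simp only [List.map_cons, List.map_nil]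
  rw [foldl_split3]
  simp only [patScore_eq answers [1, 2, 3, 4, 5] (by norm_num),
      patScore_eq answers [2, 1, 2, 3, 2, 4, 2, 5] (by norm_num),
      patScore_eq answers [3, 3, 1, 1, 2, 2, 4, 4, 5, 5] (by norm_num)]
  exact select_eq _ _ _
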